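-- pv_equiv track=rewrite | github.com/am794/CPBS_repository | Module4Day3_Assignment/GA_Functions.py | gene_frequency
-- ===== SOURCE A (Python) =====
-- def gene_frequency(string_diction,all_genes_set):
--     gene_freq = {gene:0 for gene in all_genes_set}
--
--     for outer_key,inner_diction in string_diction.items():
--         for inner_key, inner_value in inner_diction.items():
--             if outer_key in all_genes_set:
--                 gene_freq[outer_key]+=1
--             if inner_key in all_genes_set:
--                 gene_freq[inner_key]+=1 # gene_freq is a dictionary with gene name as the key and number of edges as the value
--     return gene_freq
-- ===== SOURCE B (Python) =====
-- def gene_frequency(string_diction, all_genes_set):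
--     # Gene-major instead of edge-major: for each requested gene, compute its
--     # edge count directly as (#edges where it is the source, i.e. len(inner)
--     # when the outer key matches) + (#edges where it is the target), with no
--     # mutable counter dict and no membership tests at all.
--     def edge_count(gene):
--         total = 0
--         for outer_key, inner_diction in string_diction.items():
--             if outer_key == gene:
--                 total += len(inner_diction)
--             total += list(inner_diction).count(gene)
--         return total
--     return {gene: edge_count(gene) for gene in all_genes_set}
-- ===== Notes on version B (the rewrite author's own statement) =====
-- stated objective: alternative
-- what changed: Loop interchange: A streams edges once and does guarded increments into a pre-initialised mutable counter dict; B is gene-major, computing each requested gene's count independently by a direct scan over the edges (source edges weighted by len(inner_diction), target edges via list.count), with no counter dict, no membership tests and no shared accumulator.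
import Mathlib
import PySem

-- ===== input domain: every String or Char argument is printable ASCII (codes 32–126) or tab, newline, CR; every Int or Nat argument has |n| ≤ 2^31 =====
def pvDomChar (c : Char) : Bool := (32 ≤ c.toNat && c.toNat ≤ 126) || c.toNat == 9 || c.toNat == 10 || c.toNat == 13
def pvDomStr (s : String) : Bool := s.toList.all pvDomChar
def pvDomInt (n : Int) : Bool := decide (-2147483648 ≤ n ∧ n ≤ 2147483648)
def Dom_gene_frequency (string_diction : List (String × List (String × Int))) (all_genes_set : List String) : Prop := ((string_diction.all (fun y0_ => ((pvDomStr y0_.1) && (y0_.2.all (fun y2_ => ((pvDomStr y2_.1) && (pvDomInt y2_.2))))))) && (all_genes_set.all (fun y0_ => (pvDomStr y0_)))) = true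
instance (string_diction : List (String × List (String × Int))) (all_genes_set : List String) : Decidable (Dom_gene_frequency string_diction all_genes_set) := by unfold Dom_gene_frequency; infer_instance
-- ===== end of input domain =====

-- B is gene-major where A is edge-major: each requested gene's count is computed by a
-- direct scan over the edges, with no mutable counter dict (objective: alternative).

-- ===== PORT A =====
def gene_frequency (string_diction : List (String × List (String × Int))) (all_genes_set : List String) : List (String × Int) :=
  let gene_freq : PySem.Dict String Int :=
    all_genes_set.foldl (fun d gene => d.insert gene 0) PySem.Dict.empty
  let gene_freq :=
    string_diction.foldl (fun d p =>
      p.2.foldl (fun d q =>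
        -- 'gene_freq[k] += 1' ported as 'modify k 0 (· + 1)': the guard ensures k is in
        -- all_genes_set, hence already a key of gene_freq, so the default 0 is never used
        let d := if all_genes_set.contains p.1 then d.modify p.1 0 (· + 1) else d
        if all_genes_set.contains q.1 then d.modify q.1 0 (· + 1) else d) d) gene_freq
  gene_freq.items

-- ===== PORT B =====
def gene_frequency_alt (string_diction : List (String × List (String × Int))) (all_genes_set : List String) : List (String × Int) :=
  let edge_count : String → Int := fun gene =>
    string_diction.foldl (fun total p =>
      let total := total + (if p.1 = gene then (p.2.length : Int) else 0)
      -- 'list(inner_diction).count(gene)'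
      total + (((p.2.map Prod.fst).count gene : Nat) : Int)) 0
  (all_genes_set.foldl (fun d gene => d.insert gene (edge_count gene)) PySem.Dict.empty).items

-- ===== PRECONDITION & SPEC =====
def Spec_gene_frequency (string_diction : List (String × List (String × Int))) (all_genes_set : List String) (out : List (String × Int)) : Prop := out = gene_frequency_alt string_diction all_genes_set
instance (string_diction : List (String × List (String × Int))) (all_genes_set : List String) (out : List (String × Int)) : Decidable (Spec_gene_frequency string_diction all_genes_set out) := by unfold Spec_gene_frequency; infer_instance

-- ===== CLAIM (what is proved, stated in full; the proofs are below) =====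
def Claim_equal_gene_frequency : Prop := ∀ (string_diction : List (String × List (String × Int))) (all_genes_set : List String), Dom_gene_frequency string_diction all_genes_set → Spec_gene_frequency string_diction all_genes_set (gene_frequency string_diction all_genes_set)

-- ===== LEMMAS AND PROOFS =====

/-- Total number of times `g` occurs as an edge endpoint: each outer key `p.1` counts
`p.2.length` times, each inner key once. -/
def cntGF : List (String × List (String × Int)) → String → Int
  | [], _ => 0
  | p :: rest, g =>
      (if p.1 = g then (p.2.length : Int) else 0)
        + ((p.2.map Prod.fst).count g : Int) + cntGF rest g

theorem edge_count_eq_cntGF :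
    ∀ (sd : List (String × List (String × Int))) (acc : Int) (g : String),
      sd.foldl (fun total p =>
        total + (if p.1 = g then (p.2.length : Int) else 0)
          + (((p.2.map Prod.fst).count g : Nat) : Int)) acc
        = acc + cntGF sd g := by
  intro sd
  induction sd with
  | nil => intro acc g; simp [cntGF]
  | cons p rest ih =>
      intro acc g
      simp only [List.foldl_cons, ih, cntGF]
      ring

theorem getD_foldl_insert_F (F : String → Int) :
    ∀ (l : List String) (d : PySem.Dict String Int) (g : String),
      (l.foldl (fun d x => d.insert x (F x)) d).getD g 0
        = if g ∈ l then F g else d.getD g 0 := by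
  intro l
  induction l with
  | nil => intro d g; simp
  | cons a l ih =>
      intro d g
      simp only [List.foldl_cons, ih, PySem.Dict.getD_insert, List.mem_cons]
      by_cases hl : g ∈ l <;> by_cases ha : g = a <;> simp [hl, ha]

theorem getD_cmod (b : Bool) (d : PySem.Dict String Int) (k g : String) :
    (if b then d.modify k 0 (· + 1) else d).getD g 0
      = d.getD g 0 + (if b = true ∧ g = k then 1 else 0) := by
  cases b with
  | false => simp
  | true =>
      simp only [if_true, PySem.Dict.getD_modify]
      by_cases h : g = k <;> simp [h]

theorem getD_innerA (ags : List String) (p1 : String) :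
    ∀ (l : List (String × Int)) (d : PySem.Dict String Int) (g : String),
      (l.foldl (fun d q =>
          let d := if ags.contains p1 then d.modify p1 0 (· + 1) else d
          if ags.contains q.1 then d.modify q.1 0 (· + 1) else d) d).getD g 0
        = d.getD g 0
          + (if ags.contains g
             then (if p1 = g then (l.length : Int) else 0) + ((l.map Prod.fst).count g : Int)
             else 0) := by
  intro l
  induction l with
  | nil => intro d g; simp
  | cons q l ih =>
      intro d g
      simp only [List.foldl_cons, ih, getD_cmod, List.length_cons, List.map_cons,
        List.count_cons, beq_iff_eq]
      by_cases c1 : p1 = g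
      · subst c1
        by_cases c2 : q.1 = p1
        · rw [c2]
          by_cases hp : p1 ∈ ags <;> simp [hp]
          push_cast; ring
        · have c2' : ¬ p1 = q.1 := fun h => c2 h.symm
          by_cases hp : p1 ∈ ags <;> by_cases hq : q.1 ∈ ags <;>
            simp [hp, hq, c2, c2'] <;> (try push_cast) <;> (try ring)
      · have c1' : ¬ g = p1 := fun h => c1 h.symm
        by_cases c2 : q.1 = g
        · subst c2
          by_cases hp : p1 ∈ ags <;> by_cases hq : q.1 ∈ ags <;>
            simp [hp, hq, c1, c1'] <;> (try push_cast) <;> (try ring)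
        · have c2' : ¬ g = q.1 := fun h => c2 h.symm
          by_cases hp : p1 ∈ ags <;> by_cases hq : q.1 ∈ ags <;> by_cases hg : g ∈ ags <;>
            simp [hp, hq, hg, c1, c1', c2, c2'] <;> (try push_cast) <;> (try ring)

theorem getD_outerA (ags : List String) :
    ∀ (sd : List (String × List (String × Int))) (d : PySem.Dict String Int) (g : String),
      (sd.foldl (fun d p =>
          p.2.foldl (fun d q =>
            let d := if ags.contains p.1 then d.modify p.1 0 (· + 1) else d
            if ags.contains q.1 then d.modify q.1 0 (· + 1) else d) d) d).getD g 0
        = d.getD g 0 + (if ags.contains g then cntGF sd g else 0) := by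
  intro sd
  induction sd with
  | nil => intro d g; simp [cntGF]
  | cons p rest ih =>
      intro d g
      simp only [List.foldl_cons, ih, getD_innerA, cntGF]
      by_cases hg : g ∈ ags <;> simp [hg] <;> (try ring)

theorem contains_innerA (ags : List String) (p1 : String) :
    ∀ (l : List (String × Int)) (d : PySem.Dict String Int),
      (∀ k, k ∈ ags → d.contains k = true) →
      (∀ k, (l.foldl (fun d q =>
          let d := if ags.contains p1 then d.modify p1 0 (· + 1) else d
          if ags.contains q.1 then d.modify q.1 0 (· + 1) else d) d).contains k = d.contains k) := by
  intro l
  induction l with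
  | nil => intro d _ k; simp
  | cons q l ih =>
      intro d hd k
      have hstep : ∀ k',
          ((fun d (q : String × Int) =>
            let d := if ags.contains p1 then d.modify p1 0 (· + 1) else d
            if ags.contains q.1 then d.modify q.1 0 (· + 1) else d) d q).contains k'
            = d.contains k' := by
        intro k'
        by_cases c1 : p1 ∈ ags <;> by_cases c2 : q.1 ∈ ags
        · have b1 : ags.contains p1 = true := by simpa using c1
          have b2 : ags.contains q.1 = true := by simpa using c2
          simp only [b1, b2, if_true, PySem.Dict.contains_modify]
          by_cases e2 : k' = q.1
          · subst e2; simp [hd _ c2]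
          · by_cases e1 : k' = p1
            · subst e1; simp [hd _ c1, beq_eq_false_iff_ne.mpr e2]
            · simp [beq_eq_false_iff_ne.mpr e1, beq_eq_false_iff_ne.mpr e2]
        · have b1 : ags.contains p1 = true := by simpa using c1
          have b2 : ags.contains q.1 = false := by simpa using c2
          simp only [b1, b2, if_true, Bool.false_eq_true, if_false,
            PySem.Dict.contains_modify]
          by_cases e1 : k' = p1
          · subst e1; simp [hd _ c1]
          · simp [beq_eq_false_iff_ne.mpr e1]
        · have b1 : ags.contains p1 = false := by simpa using c1
          have b2 : ags.contains q.1 = true := by simpa using c2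
          simp only [b1, b2, if_true, Bool.false_eq_true, if_false,
            PySem.Dict.contains_modify]
          by_cases e2 : k' = q.1
          · subst e2; simp [hd _ c2]
          · simp [beq_eq_false_iff_ne.mpr e2]
        · have b1 : ags.contains p1 = false := by simpa using c1
          have b2 : ags.contains q.1 = false := by simpa using c2
          simp only [b1, b2, Bool.false_eq_true, if_false]
      rw [List.foldl_cons, ih _ (fun k' hk' => by rw [hstep k']; exact hd k' hk'), hstep k]

theorem keys_innerA (ags : List String) (p1 : String) :
    ∀ (l : List (String × Int)) (d : PySem.Dict String Int),
      (∀ k, k ∈ ags → d.contains k = true) →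
      (l.foldl (fun d q =>
          let d := if ags.contains p1 then d.modify p1 0 (· + 1) else d
          if ags.contains q.1 then d.modify q.1 0 (· + 1) else d) d).keys = d.keys := by
  intro l
  induction l with
  | nil => intro d _; simp
  | cons q l ih =>
      intro d hd
      have kmod : ∀ (d' : PySem.Dict String Int) (k : String), d'.contains k = true →
          (d'.modify k 0 (· + 1)).keys = d'.keys := by
        intro d' k hk
        rw [PySem.Dict.keys_modify, PySem.Dict.keys_insert_of_contains _ _ hk]
      have hstep : ((fun d (q : String × Int) =>
            let d := if ags.contains p1 then d.modify p1 0 (· + 1) else d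
            if ags.contains q.1 then d.modify q.1 0 (· + 1) else d) d q).keys = d.keys := by
        by_cases c1 : p1 ∈ ags <;> by_cases c2 : q.1 ∈ ags
        · have b1 : ags.contains p1 = true := by simpa using c1
          have b2 : ags.contains q.1 = true := by simpa using c2
          simp only [b1, b2, if_true]
          have hq' : (d.modify p1 0 (· + 1)).contains q.1 = true := by
            rw [PySem.Dict.contains_modify]
            simp [hd _ c2]
          rw [kmod _ _ hq', kmod _ _ (hd _ c1)]
        · have b1 : ags.contains p1 = true := by simpa using c1
          have b2 : ags.contains q.1 = false := by simpa using c2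
          simp only [b1, b2, if_true, Bool.false_eq_true, if_false]
          exact kmod _ _ (hd _ c1)
        · have b1 : ags.contains p1 = false := by simpa using c1
          have b2 : ags.contains q.1 = true := by simpa using c2
          simp only [b1, b2, if_true, Bool.false_eq_true, if_false]
          exact kmod _ _ (hd _ c2)
        · have b1 : ags.contains p1 = false := by simpa using c1
          have b2 : ags.contains q.1 = false := by simpa using c2
          simp only [b1, b2, Bool.false_eq_true, if_false]
      have hcont := contains_innerA ags p1 [q] d hd
      rw [List.foldl_cons, ih, hstep]
      intro k hk
      have := hcont k
      simp only [List.foldl_cons, List.foldl_nil] at this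
      rw [this]; exact hd k hk

theorem keys_outerA (ags : List String) :
    ∀ (sd : List (String × List (String × Int))) (d : PySem.Dict String Int),
      (∀ k, k ∈ ags → d.contains k = true) →
      (sd.foldl (fun d p =>
          p.2.foldl (fun d q =>
            let d := if ags.contains p.1 then d.modify p.1 0 (· + 1) else d
            if ags.contains q.1 then d.modify q.1 0 (· + 1) else d) d) d).keys = d.keys := by
  intro sd
  induction sd with
  | nil => intro d _; simp
  | cons p rest ih =>
      intro d hd
      have hcont := contains_innerA ags p.1 p.2 d hd
      rw [List.foldl_cons, ih _ (fun k hk => by rw [hcont k]; exact hd k hk),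
        keys_innerA ags p.1 p.2 d hd]

theorem keys_init (ags : List String) (F : String → Int) :
    (ags.foldl (fun d g => d.insert g (F g)) PySem.Dict.empty).keys
      = PySem.Set.ofList ags := by
  rw [PySem.Dict.keys_foldl_insert, PySem.Dict.keys_empty, PySem.Set.update_nil_left]

-- ===== VERDICT (by name: the statement is the Claim_ definition above) =====
theorem gene_frequency_spec : Claim_equal_gene_frequency := by
  intro sd ags _
  unfold Spec_gene_frequency
  simp only [gene_frequency, gene_frequency_alt]
  have hinit : ∀ k, k ∈ ags →
      (ags.foldl (fun d g => d.insert g (0 : Int)) PySem.Dict.empty).contains k = true := by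
    intro k hk
    rw [PySem.Dict.contains_iff_mem_keys, keys_init ags (fun _ => 0), PySem.Set.mem_ofList]
    exact hk
  have hkeysA : (sd.foldl (fun d p =>
      p.2.foldl (fun d q =>
        let d := if ags.contains p.1 then d.modify p.1 0 (· + 1) else d
        if ags.contains q.1 then d.modify q.1 0 (· + 1) else d) d)
      (ags.foldl (fun d g => d.insert g (0 : Int)) PySem.Dict.empty)).keys
      = PySem.Set.ofList ags := by
    rw [keys_outerA ags sd _ hinit, keys_init ags (fun _ => 0)]
  have hkeysB : (ags.foldl (fun d gene => d.insert gene
      (sd.foldl (fun total p =>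
        total + (if p.1 = gene then (p.2.length : Int) else 0)
          + (((p.2.map Prod.fst).count gene : Nat) : Int)) 0))
      PySem.Dict.empty).keys = PySem.Set.ofList ags :=
    keys_init ags _
  rw [PySem.Dict.items_eq_map_keys _ (by rw [hkeysA]; exact PySem.Set.nodup_ofList ags) 0,
    PySem.Dict.items_eq_map_keys _ (by rw [hkeysB]; exact PySem.Set.nodup_ofList ags) 0,
    hkeysA, hkeysB]
  apply List.map_congr_left
  intro g hg
  have hmem : g ∈ ags := (PySem.Set.mem_ofList ags g).1 hg
  rw [getD_outerA, getD_foldl_insert_F (fun _ => (0 : Int)),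
    getD_foldl_insert_F (fun gene =>
      sd.foldl (fun total p =>
        total + (if p.1 = gene then (p.2.length : Int) else 0)
          + (((p.2.map Prod.fst).count gene : Nat) : Int)) 0),
    edge_count_eq_cntGF]
  simp [hmem]
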